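-- pv_equiv track=rewrite | github.com/njain-icon/classifier | classifier/entity_classifier/core/utils.py | has_consecutive_increasing_numbers
-- ===== SOURCE A (Python) =====
-- def has_consecutive_increasing_numbers(s: str, min_consecutive: int = 5) -> bool:
--     """
--     Check if the input string contains a sequence of at least `min_consecutive` digits
--     where each digit is exactly one greater than the previous (e.g., '123456').
--
--     Args:
--         s (str): The string to check.
--         min_consecutive (int): The minimum length of consecutive increasing digits. Default is 5.
--
--     Returns:
--         bool: True if such a sequence exists, False otherwise.
--     """
--
--     digits = [int(c) for c in s if c.isdigit()]
--     if len(digits) < min_consecutive: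
--         return False
--     if len(digits) != len(s):
--         return False
--
--     count = 1
--     for i in range(1, len(digits)):
--         if digits[i] == digits[i - 1] + 1:
--             count += 1
--             if count >= min_consecutive:
--                 return True
--         else:
--             count = 1
--     return False
-- ===== SOURCE B (Python) =====
-- def has_consecutive_increasing_numbers(s: str, min_consecutive: int = 5) -> bool:
--     """Sliding-window re-implementation: test each length-`min_consecutive`
--     window of the digit list independently instead of maintaining a running
--     counter."""
--     digits = [int(c) for c in s if c.isdigit()]
--     if len(digits) < min_consecutive:
--         return False
--     if len(digits) != len(s):
--         return False
--     return any(
--         all(digits[i + k] == digits[i + k - 1] + 1 for k in range(1, min_consecutive))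
--         for i in range(len(digits) - min_consecutive + 1)
--     )
-- ===== Notes on version B (the rewrite author's own statement) =====
-- stated objective: alternative
-- what changed: The single-pass running-counter loop is replaced by a sliding-window scan that checks every length-min_consecutive window of the digit list independently with any/all over ranges.
-- intended difference: For degenerate min_consecutive <= 1 on an all-digit string of length >= min_consecutive with no adjacent increasing digit pair, A returns False (its counter loop can only return True from inside the loop) while B returns True, which is intended since a run of length >= 1 (or >= 0) trivially exists. — e.g. on has_consecutive_increasing_numbers("5", 1): A returns false, B returns true
import Mathlib
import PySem

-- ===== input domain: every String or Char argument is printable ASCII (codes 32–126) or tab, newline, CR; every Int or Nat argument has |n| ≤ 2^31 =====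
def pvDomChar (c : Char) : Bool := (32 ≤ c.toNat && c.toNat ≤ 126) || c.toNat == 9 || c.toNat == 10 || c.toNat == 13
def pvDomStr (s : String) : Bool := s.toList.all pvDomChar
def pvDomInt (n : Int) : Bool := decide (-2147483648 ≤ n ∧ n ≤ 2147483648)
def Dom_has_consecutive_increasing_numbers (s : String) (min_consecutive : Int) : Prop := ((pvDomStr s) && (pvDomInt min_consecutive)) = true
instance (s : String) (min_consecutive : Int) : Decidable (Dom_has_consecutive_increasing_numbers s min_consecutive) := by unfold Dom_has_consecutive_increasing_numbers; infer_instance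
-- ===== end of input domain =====

-- B replaces A's running-counter pass by an independent sliding-window any/all scan (alternative
-- decomposition, same digit extraction and guards); on the degenerate corner described at D_ below
-- B returns the intended value where A does not.

-- ===== PORT A =====
-- the `for i in range(1, len(digits))` loop with its early return and `count` accumulator;
-- `int(c)` on an ASCII digit character is exactly (c.toNat : Int) - 48 (Dom admits only ASCII)
def pvCountLoop (d : List Int) (m : Int) : List Int → Int → Bool
  | [], _ => false
  | i :: rest, count =>
      if PySem.List.pyGetD d i 0 = PySem.List.pyGetD d (i - 1) 0 + 1 then
        (if count + 1 ≥ m then true else pvCountLoop d m rest (count + 1))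
      else pvCountLoop d m rest 1

def has_consecutive_increasing_numbers (s : String) (min_consecutive : Int) : Bool :=
  let digits := (s.toList.filter PySem.Chars.isdigit).map (fun c => (c.toNat : Int) - 48)
  if (digits.length : Int) < min_consecutive then false
  else if (digits.length : Int) ≠ PySem.Str.len s then false
  else pvCountLoop digits min_consecutive (PySem.List.pyRange 1 (digits.length : Int) 1) 1

-- ===== PORT B =====
def has_consecutive_increasing_numbers_alt (s : String) (min_consecutive : Int) : Bool :=
  let digits := (s.toList.filter PySem.Chars.isdigit).map (fun c => (c.toNat : Int) - 48)
  if (digits.length : Int) < min_consecutive then false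
  else if (digits.length : Int) ≠ PySem.Str.len s then false
  else (PySem.List.pyRange 0 ((digits.length : Int) - min_consecutive + 1) 1).any (fun i =>
        (PySem.List.pyRange 1 min_consecutive 1).all (fun k =>
          decide (PySem.List.pyGetD digits (i + k) 0 = PySem.List.pyGetD digits (i + k - 1) 0 + 1)))

-- ===== PRECONDITION & SPEC =====
-- For degenerate min_consecutive ≤ 1 on an all-digit string of length ≥ min_consecutive with no
-- adjacent increasing digit pair, A returns false (its counter loop can only return True from inside
-- the loop) while B returns true, which is intended: a run of length ≥ 1 (or ≥ 0) trivially exists.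
def D_has_consecutive_increasing_numbers (s : String) (min_consecutive : Int) : Prop :=
  min_consecutive ≤ 1 ∧ min_consecutive ≤ (s.toList.length : Int) ∧
  s.toList.all (fun c => 48 ≤ c.toNat && c.toNat ≤ 57) = true ∧
  (s.toList.zip s.toList.tail).all (fun p => !(p.2.toNat == p.1.toNat + 1)) = true
instance (s : String) (min_consecutive : Int) : Decidable (D_has_consecutive_increasing_numbers s min_consecutive) := by unfold D_has_consecutive_increasing_numbers; infer_instance

def Spec_has_consecutive_increasing_numbers (s : String) (min_consecutive : Int) (out : Bool) : Prop := ¬ D_has_consecutive_increasing_numbers s min_consecutive → out = has_consecutive_increasing_numbers_alt s min_consecutive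
instance (s : String) (min_consecutive : Int) (out : Bool) : Decidable (Spec_has_consecutive_increasing_numbers s min_consecutive out) := by unfold Spec_has_consecutive_increasing_numbers; infer_instance

def pvDiffWitness_has_consecutive_increasing_numbers : String × Int := ("5", 1)
def pvDiffWitnessOut_has_consecutive_increasing_numbers : Bool × Bool := (false, true)

-- ===== CLAIM (what is proved, stated in full; the proofs are below) =====
def Claim_unchanged_has_consecutive_increasing_numbers : Prop := ∀ (s : String) (min_consecutive : Int), Dom_has_consecutive_increasing_numbers s min_consecutive → Spec_has_consecutive_increasing_numbers s min_consecutive (has_consecutive_increasing_numbers s min_consecutive)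
def Claim_changed_has_consecutive_increasing_numbers : Prop := Dom_has_consecutive_increasing_numbers (pvDiffWitness_has_consecutive_increasing_numbers.1) (pvDiffWitness_has_consecutive_increasing_numbers.2) ∧ D_has_consecutive_increasing_numbers (pvDiffWitness_has_consecutive_increasing_numbers.1) (pvDiffWitness_has_consecutive_increasing_numbers.2) ∧ has_consecutive_increasing_numbers (pvDiffWitness_has_consecutive_increasing_numbers.1) (pvDiffWitness_has_consecutive_increasing_numbers.2) = pvDiffWitnessOut_has_consecutive_increasing_numbers.1 ∧ has_consecutive_increasing_numbers_alt (pvDiffWitness_has_consecutive_increasing_numbers.1) (pvDiffWitness_has_consecutive_increasing_numbers.2) = pvDiffWitnessOut_has_consecutive_increasing_numbers.2 ∧ pvDiffWitnessOut_has_consecutive_increasing_numbers.1 ≠ pvDiffWitnessOut_has_consecutive_increasing_numbers.2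
def Claim_exact_has_consecutive_increasing_numbers : Prop := ∀ (s : String) (min_consecutive : Int), Dom_has_consecutive_increasing_numbers s min_consecutive → D_has_consecutive_increasing_numbers s min_consecutive → has_consecutive_increasing_numbers s min_consecutive ≠ has_consecutive_increasing_numbers_alt s min_consecutive

-- ===== LEMMAS AND PROOFS =====

-- "digits[i] == digits[i-1] + 1" as a proposition on the digit list
def pvStep (d : List Int) (t : Int) : Prop :=
  PySem.List.pyGetD d t 0 = PySem.List.pyGetD d (t - 1) 0 + 1

-- Python's c.isdigit() in Char.toNat form ('0'.toNat = 48, '9'.toNat = 57)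
lemma pv_isdigit_eq (c : Char) : PySem.Chars.isdigit c = (48 ≤ c.toNat && c.toNat ≤ 57) := by
  have h1 : ('0' ≤ c) ↔ (48 ≤ c.toNat) := by
    rw [Char.le_def, UInt32.le_iff_toNat_le]; exact Iff.rfl
  have h2 : (c ≤ '9') ↔ (c.toNat ≤ 57) := by
    rw [Char.le_def, UInt32.le_iff_toNat_le]; exact Iff.rfl
  simp only [PySem.Chars.isdigit, decide_eq_decide.mpr h1, decide_eq_decide.mpr h2]

-- for m ≤ 2 the counter loop returns true exactly when some visited index is a step
lemma pvCountLoop_easy (d : List Int) (m : Int) (hm : m ≤ 2) :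
    ∀ (idxs : List Int) (c : Int), 1 ≤ c →
      (pvCountLoop d m idxs c = true ↔ ∃ i ∈ idxs, pvStep d i) := by
  intro idxs
  induction idxs with
  | nil => intro c hc; simp [pvCountLoop]
  | cons i rest ih =>
    intro c hc
    by_cases hstep : PySem.List.pyGetD d i 0 = PySem.List.pyGetD d (i - 1) 0 + 1
    · have : c + 1 ≥ m := by omega
      simp [pvCountLoop, hstep, this, pvStep]
    · rw [pvCountLoop, if_neg hstep, ih 1 le_rfl]
      simp only [List.mem_cons]
      constructor
      · rintro ⟨j, hj, hs⟩; exact ⟨j, Or.inr hj, hs⟩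
      · rintro ⟨j, hj | hj, hs⟩
        · exact absurd (hj ▸ hs) hstep
        · exact ⟨j, hj, hs⟩

-- loop invariant for m ≥ 2: with run of length c known to end just before i, the loop finds a window
lemma pvCountLoop_window (d : List Int) (m : Int) (hm : 2 ≤ m) :
    ∀ (fuel : Nat) (i c : Int), ((d.length : Int) - i).toNat = fuel → 1 ≤ c → c ≤ i → c < m →
      (∀ t : Int, i - c < t → t < i → pvStep d t) →
      (pvCountLoop d m (PySem.List.pyRange i (d.length : Int) 1) c = true ↔
        ∃ p : Int, i - c ≤ p ∧ p + m ≤ (d.length : Int) ∧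
          ∀ k : Int, 1 ≤ k → k < m → pvStep d (p + k)) := by
  intro fuel
  induction fuel with
  | zero =>
    intro i c hfuel hc hci hcm H
    have hni : (d.length : Int) ≤ i := by omega
    rw [PySem.List.pyRange_one_eq_nil hni]
    simp only [pvCountLoop]
    refine iff_of_false (by simp) ?_
    rintro ⟨p, hp1, hp2, -⟩
    omega
  | succ fuel ih =>
    intro i c hfuel hc hci hcm H
    have hin : i < (d.length : Int) := by omega
    rw [PySem.List.pyRange_one_cons hin]
    by_cases hstep : PySem.List.pyGetD d i 0 = PySem.List.pyGetD d (i - 1) 0 + 1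
    · rw [pvCountLoop, if_pos hstep]
      by_cases hge : c + 1 ≥ m
      · rw [if_pos hge]
        simp only [true_iff]
        refine ⟨i - c, le_rfl, by omega, ?_⟩
        intro k hk1 hkm
        by_cases h : i - c + k < i
        · exact H _ (by omega) h
        · have hik : i - c + k = i := by omega
          rw [hik]; exact hstep
      · rw [if_neg hge]
        rw [ih (i + 1) (c + 1) (by omega) (by omega) (by omega) (by omega)
          (by intro t ht1 ht2
              by_cases h : t < i
              · exact H t (by omega) h
              · have : t = i := by omega
                rw [this]; exact hstep)]
        exact exists_congr fun p => by
          constructor <;> rintro ⟨h1, h2, h3⟩ <;> exact ⟨by omega, h2, h3⟩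
    · rw [pvCountLoop, if_neg hstep]
      rw [ih (i + 1) 1 (by omega) le_rfl (by omega) (by omega)
        (by intro t ht1 ht2; omega)]
      constructor
      · rintro ⟨p, h1, h2, h3⟩; exact ⟨p, by omega, h2, h3⟩
      · rintro ⟨p, h1, h2, h3⟩
        refine ⟨p, ?_, h2, h3⟩
        by_contra hpi
        have hk : pvStep d (p + (i - p)) := h3 (i - p) (by omega) (by omega)
        have : p + (i - p) = i := by omega
        rw [this] at hk
        exact hstep hk

-- a step inside the mapped digit list is an adjacent increasing char pair, and conversely
lemma pvStep_bridge (l : List Char) :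
    (∃ i : Int, 1 ≤ i ∧ i < ((l.map (fun c => (c.toNat : Int) - 48)).length : Int) ∧
        pvStep (l.map (fun c => (c.toNat : Int) - 48)) i) ↔
      ∃ p ∈ l.zip l.tail, p.2.toNat = p.1.toNat + 1 := by
  set d := l.map (fun c => (c.toNat : Int) - 48) with hd
  have hlen : d.length = l.length := by simp [hd]
  have hget : ∀ j : Nat, (hj : j < l.length) → d[j]'(by omega) = (l[j].toNat : Int) - 48 := by
    intro j hj; simp [hd]
  constructor
  · rintro ⟨i, hi1, hi2, hs⟩
    have hjlt : i.toNat < l.length := by omega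
    have hj1 : 1 ≤ i.toNat := by omega
    rw [pvStep, PySem.List.pyGetD_eq_getElem d 0 (by omega) (by omega),
        PySem.List.pyGetD_eq_getElem d 0 (by omega) (by omega)] at hs
    have hi1nat : (i - 1).toNat = i.toNat - 1 := by omega
    simp only [hi1nat] at hs
    rw [hget i.toNat hjlt, hget (i.toNat - 1) (by omega)] at hs
    refine ⟨(l[i.toNat - 1]'(by omega), l[i.toNat]'hjlt), ?_, by simp; omega⟩
    rw [List.mem_iff_getElem]
    refine ⟨i.toNat - 1, by simp [List.length_zip]; omega, ?_⟩
    rw [List.getElem_zip, List.getElem_tail]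
    congr 1
    congr 1
    omega
  · rintro ⟨p, hp, hsucc⟩
    rw [List.mem_iff_getElem] at hp
    obtain ⟨j, hj, hpj⟩ := hp
    have hjl : j + 1 < l.length := by
      simp [List.length_zip] at hj; omega
    rw [List.getElem_zip, List.getElem_tail] at hpj
    refine ⟨(j + 1 : Nat), by omega, by omega, ?_⟩
    rw [pvStep, PySem.List.pyGetD_eq_getElem d 0 (by omega) (by omega),
        PySem.List.pyGetD_eq_getElem d 0 (by omega) (by omega)]
    have h1 : ((j + 1 : Nat) : Int).toNat = j + 1 := by omega
    have h2 : (((j + 1 : Nat) : Int) - 1).toNat = j := by omega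
    simp only [h1, h2]
    rw [hget (j + 1) hjl, hget j (by omega)]
    rw [← hpj] at hsucc
    simp at hsucc
    omega


-- both ports agree whenever the guards fire, and otherwise reduce to the same window existence
lemma pv_agree (s : String) (m : Int)
    (hnd : ¬ D_has_consecutive_increasing_numbers s m) :
    has_consecutive_increasing_numbers s m = has_consecutive_increasing_numbers_alt s m := by
  simp only [has_consecutive_increasing_numbers, has_consecutive_increasing_numbers_alt]
  set d := (s.toList.filter PySem.Chars.isdigit).map (fun c => (c.toNat : Int) - 48) with hd
  by_cases h1 : (d.length : Int) < m
  · rw [if_pos h1, if_pos h1]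
  rw [if_neg h1, if_neg h1]
  by_cases h2 : (d.length : Int) ≠ PySem.Str.len s
  · rw [if_pos h2, if_pos h2]
  rw [if_neg h2, if_neg h2]
  rw [ne_eq, not_not] at h2
  have hsl : PySem.Str.len s = (s.toList.length : Int) := rfl
  have hlen : d.length = s.toList.length := by rw [hsl] at h2; exact_mod_cast h2
  have hfl : s.toList.filter PySem.Chars.isdigit = s.toList :=
    List.filter_eq_self.mpr (List.length_filter_eq_length_iff.mp (by
      have := hlen; simpa [hd] using this))
  by_cases hm2 : 2 ≤ m
  · -- main case: both sides decide the same window existence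
    have hA := pvCountLoop_window d m hm2 (((d.length : Int) - 1).toNat) 1 1 rfl le_rfl le_rfl
      (by omega) (by intro t ht1 ht2; omega)
    have hB : ((PySem.List.pyRange 0 ((d.length : Int) - m + 1) 1).any (fun i =>
          (PySem.List.pyRange 1 m 1).all (fun k =>
            decide (PySem.List.pyGetD d (i + k) 0 = PySem.List.pyGetD d (i + k - 1) 0 + 1))) = true)
        ↔ ∃ i : Int, 0 ≤ i ∧ i < (d.length : Int) - m + 1 ∧
            ∀ k : Int, 1 ≤ k → k < m → pvStep d (i + k) := by
      rw [List.any_eq_true]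
      constructor
      · rintro ⟨i, hi, hall⟩
        rw [PySem.List.mem_pyRange_one] at hi
        rw [List.all_eq_true] at hall
        refine ⟨i, hi.1, hi.2, ?_⟩
        intro k hk1 hkm
        have := hall k (PySem.List.mem_pyRange_one.mpr ⟨hk1, hkm⟩)
        simpa [pvStep] using this
      · rintro ⟨i, hi0, hilt, hwin⟩
        refine ⟨i, PySem.List.mem_pyRange_one.mpr ⟨hi0, hilt⟩, ?_⟩
        rw [List.all_eq_true]
        intro k hk
        rw [PySem.List.mem_pyRange_one] at hk
        simpa [pvStep] using hwin k hk.1 hk.2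
    apply Bool.coe_iff_coe.mp
    rw [hA, hB]
    constructor
    · rintro ⟨p, hp1, hp2, hp3⟩; exact ⟨p, by omega, by omega, hp3⟩
    · rintro ⟨p, hp1, hp2, hp3⟩; exact ⟨p, by omega, by omega, hp3⟩
  · -- degenerate m ≤ 1: B is true, and ¬D_ forces an increasing pair so A is true too
    have hm1 : m ≤ 1 := by omega
    have hdig : s.toList.all (fun c => 48 ≤ c.toNat && c.toNat ≤ 57) = true := by
      rw [List.all_eq_true]
      intro c hc
      have := List.filter_eq_self.mp hfl c hc
      rwa [pv_isdigit_eq] at this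
    have hpair : ∃ p ∈ s.toList.zip s.toList.tail, p.2.toNat = p.1.toNat + 1 := by
      by_contra hno
      push_neg at hno
      refine hnd ⟨hm1, by omega, hdig, ?_⟩
      rw [List.all_eq_true]
      intro p hp
      simpa using hno p hp
    have hdl : d = s.toList.map (fun c => (c.toNat : Int) - 48) := by rw [hd, hfl]
    have hstep : ∃ i : Int, 1 ≤ i ∧ i < (d.length : Int) ∧ pvStep d i := by
      rw [hdl]
      exact (pvStep_bridge s.toList).mpr hpair
    have hAtrue : pvCountLoop d m (PySem.List.pyRange 1 (d.length : Int) 1) 1 = true := by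
      rw [pvCountLoop_easy d m (by omega) _ 1 le_rfl]
      obtain ⟨i, hi1, hi2, hs⟩ := hstep
      exact ⟨i, PySem.List.mem_pyRange_one.mpr ⟨hi1, hi2⟩, hs⟩
    have hBtrue : ((PySem.List.pyRange 0 ((d.length : Int) - m + 1) 1).any (fun i =>
          (PySem.List.pyRange 1 m 1).all (fun k =>
            decide (PySem.List.pyGetD d (i + k) 0 = PySem.List.pyGetD d (i + k - 1) 0 + 1))) = true) := by
      rw [List.any_eq_true]
      refine ⟨0, PySem.List.mem_pyRange_one.mpr ⟨le_rfl, by omega⟩, ?_⟩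
      rw [PySem.List.pyRange_one_eq_nil hm1]
      simp
    rw [hAtrue, hBtrue]

theorem has_consecutive_increasing_numbers_spec : Claim_unchanged_has_consecutive_increasing_numbers := by
  intro s m _dom hnd
  exact pv_agree s m hnd

-- ===== VERDICT (by name: the statement is the Claim_ definition above) =====
set_option maxRecDepth 32768 in
theorem has_consecutive_increasing_numbers_changed : Claim_changed_has_consecutive_increasing_numbers := by
  unfold Claim_changed_has_consecutive_increasing_numbers
  refine ⟨?_, ?_, by rfl, by rfl, ?_⟩
  · show Dom_has_consecutive_increasing_numbers "5" 1
    decide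
  · show D_has_consecutive_increasing_numbers "5" 1
    decide
  · show (false : Bool) ≠ (true : Bool)
    decide

theorem has_consecutive_increasing_numbers_tight : Claim_exact_has_consecutive_increasing_numbers := by
  intro s m _dom hd
  obtain ⟨hm1, hmlen, hdigB, hnoB⟩ := hd
  have hno : ∀ p ∈ s.toList.zip s.toList.tail, ¬ p.2.toNat = p.1.toNat + 1 := by
    intro p hp
    have := List.all_eq_true.mp hnoB p hp
    simpa using this
  simp only [has_consecutive_increasing_numbers, has_consecutive_increasing_numbers_alt]
  have hfl : s.toList.filter PySem.Chars.isdigit = s.toList := by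
    refine List.filter_eq_self.mpr fun c hc => ?_
    rw [pv_isdigit_eq]
    exact List.all_eq_true.mp hdigB c hc
  set d := (s.toList.filter PySem.Chars.isdigit).map (fun c => (c.toNat : Int) - 48) with hd'
  have hdl : d = s.toList.map (fun c => (c.toNat : Int) - 48) := by rw [hd', hfl]
  have hlen : d.length = s.toList.length := by rw [hdl]; simp
  have h1 : ¬ ((d.length : Int) < m) := by omega
  have hsl : PySem.Str.len s = (s.toList.length : Int) := rfl
  have h2 : ¬ ((d.length : Int) ≠ PySem.Str.len s) := by rw [hsl, ne_eq, not_not]; omega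
  rw [if_neg h1, if_neg h1, if_neg h2, if_neg h2]
  have hAfalse : pvCountLoop d m (PySem.List.pyRange 1 (d.length : Int) 1) 1 = false := by
    rw [Bool.eq_false_iff]
    intro htrue
    rw [pvCountLoop_easy d m (by omega) _ 1 le_rfl] at htrue
    obtain ⟨i, hi, hs⟩ := htrue
    rw [PySem.List.mem_pyRange_one] at hi
    have hex : ∃ p ∈ s.toList.zip s.toList.tail, p.2.toNat = p.1.toNat + 1 := by
      apply (pvStep_bridge s.toList).mp
      exact ⟨i, hi.1, by rw [← hdl]; exact hi.2, by rw [← hdl]; exact hs⟩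
    obtain ⟨p, hp, hps⟩ := hex
    exact hno p hp hps
  have hBtrue : ((PySem.List.pyRange 0 ((d.length : Int) - m + 1) 1).any (fun i =>
        (PySem.List.pyRange 1 m 1).all (fun k =>
          decide (PySem.List.pyGetD d (i + k) 0 = PySem.List.pyGetD d (i + k - 1) 0 + 1))) = true) := by
    rw [List.any_eq_true]
    refine ⟨0, PySem.List.mem_pyRange_one.mpr ⟨le_rfl, by omega⟩, ?_⟩
    rw [PySem.List.pyRange_one_eq_nil hm1]
    simp
  rw [hAfalse, hBtrue]
  simp
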